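-- pv_equiv track=rewrite | github.com/JanHolinka3/dimensions_and_lines | functions.py | vratPocetDesetinychMist
-- ===== SOURCE A (Python) =====
-- def vratPocetDesetinychMist(text: str) -> int:
--     pocetDesetMist = 0
--     afterSwitch = False
--     for character in text:
--         if afterSwitch == True:
--             pocetDesetMist = pocetDesetMist + 1
--         if character == ',' or character == '.':
--             afterSwitch = True
--     return pocetDesetMist
-- ===== SOURCE B (Python) =====
-- def vratPocetDesetinychMist(text: str) -> int:
--     c = text.find(',')
--     d = text.find('.')
--     if c == -1:
--         i = d
--     elif d == -1:
--         i = c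
--     else:
--         i = min(c, d)
--     return 0 if i == -1 else len(text) - i - 1
-- ===== Notes on version B (the rewrite author's own statement) =====
-- stated objective: simpler
-- what changed: Replaces the flag-and-accumulate character loop with two str.find calls picking the earliest separator and a closed-form len(text)-i-1 subtraction.
import Mathlib
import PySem

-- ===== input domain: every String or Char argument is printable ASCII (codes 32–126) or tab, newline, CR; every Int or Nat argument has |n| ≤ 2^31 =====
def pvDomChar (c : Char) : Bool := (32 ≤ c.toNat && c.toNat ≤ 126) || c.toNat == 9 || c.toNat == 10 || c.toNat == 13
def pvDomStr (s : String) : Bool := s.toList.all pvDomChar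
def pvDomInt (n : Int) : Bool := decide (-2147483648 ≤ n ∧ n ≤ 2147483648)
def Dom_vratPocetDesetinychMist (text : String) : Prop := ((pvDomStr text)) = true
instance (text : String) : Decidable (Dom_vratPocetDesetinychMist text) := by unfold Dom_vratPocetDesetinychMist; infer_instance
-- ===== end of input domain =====

-- B replaces A's flag-and-accumulate loop with two find calls and a closed-form subtraction (simpler).

-- ===== PORT A =====
-- one loop step: count += 1 if the flag is already set, then set the flag on ',' or '.'
def stepA (st : Int × Bool) (character : Char) : Int × Bool :=
  let cnt := if st.2 = true then st.1 + 1 else st.1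
  let sw := if character == ',' || character == '.' then true else st.2
  (cnt, sw)

def vratPocetDesetinychMist (text : String) : Int :=
  (text.toList.foldl stepA (0, false)).1

-- ===== PORT B =====
def vratPocetDesetinychMist_alt (text : String) : Int :=
  let c := PySem.Str.find text ","
  let d := PySem.Str.find text "."
  let i := if c = -1 then d else if d = -1 then c else min c d
  if i = -1 then 0 else (PySem.Str.len text : Int) - i - 1

-- ===== PRECONDITION & SPEC =====
def Spec_vratPocetDesetinychMist (text : String) (out : Int) : Prop := out = vratPocetDesetinychMist_alt text
instance (text : String) (out : Int) : Decidable (Spec_vratPocetDesetinychMist text out) := by unfold Spec_vratPocetDesetinychMist; infer_instance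

-- ===== CLAIM (what is proved, stated in full; the proofs are below) =====
def Claim_equal_vratPocetDesetinychMist : Prop := ∀ (text : String), Dom_vratPocetDesetinychMist text → Spec_vratPocetDesetinychMist text (vratPocetDesetinychMist text)

-- ===== LEMMAS AND PROOFS =====

-- Python's find result as an Int: -1 when absent, else the index
def idxToInt : Option Nat → Int
  | none => -1
  | some j => (j : Int)

-- minimum of two optional first-indices (none = absent)
def omin : Option Nat → Option Nat → Option Nat
  | none, o => o
  | some a, none => some a
  | some a, some b => some (min a b)

-- substring find for a single-character needle = first index of that character
theorem findGo_single (c : Char) : ∀ (l : List Char) (k : Nat),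
    PySem.Chars.find.go [c] l k = idxToInt ((List.findIdx? (fun ch => ch == c) l).map (k + ·)) := by
  intro l
  induction l with
  | nil => intro k; simp [PySem.Chars.find.go, idxToInt]
  | cons h t ih =>
    intro k
    by_cases hc : h = c
    · simp [PySem.Chars.find.go, List.isPrefixOf, hc, List.findIdx?_cons, idxToInt]
    · have hc'' : (c == h) = false := by simp [Ne.symm hc]
      rw [PySem.Chars.find.go]
      simp only [List.isPrefixOf, hc'', Bool.false_and, if_false, ih (k + 1),
        List.findIdx?_cons]
      have hc' : (h == c) = false := by simp [hc]
      simp only [hc']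
      cases List.findIdx? (fun ch => ch == c) t with
      | none => rfl
      | some j => simp [idxToInt]; omega

theorem find_single (c : Char) (l : List Char) :
    PySem.Chars.find l [c] = idxToInt (List.findIdx? (fun ch => ch == c) l) := by
  have := findGo_single c l 0
  simpa [PySem.Chars.find] using this

-- the first index of "',' or '.'" is the omin of the two single-character first indices
theorem findIdx_or (l : List Char) :
    List.findIdx? (fun ch => ch == ',' || ch == '.') l
      = omin (List.findIdx? (fun ch => ch == ',') l) (List.findIdx? (fun ch => ch == '.') l) := by
  induction l with
  | nil => rfl
  | cons h t ih =>
    simp only [List.findIdx?_cons]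
    by_cases h1 : h = ','
    · simp only [h1]
      cases List.findIdx? (fun ch => ch == '.') t <;> simp [omin]
    · by_cases h2 : h = '.'
      · simp only [h2]
        have e1 : (('.' : Char) == ',') = false := by decide
        simp only [e1]
        cases List.findIdx? (fun ch => ch == ',') t <;> simp [omin]
      · have e1 : (h == ',') = false := by simp [h1]
        have e2 : (h == '.') = false := by simp [h2]
        simp only [e1, e2, Bool.false_or, ih]
        cases List.findIdx? (fun ch => ch == ',') t <;>
          cases List.findIdx? (fun ch => ch == '.') t <;>
          simp [omin]

-- B's Int-level earliest-of-two combination agrees with omin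
theorem comb_eq_omin (a b : Option Nat) :
    (if idxToInt a = -1 then idxToInt b
     else if idxToInt b = -1 then idxToInt a
     else min (idxToInt a) (idxToInt b)) = idxToInt (omin a b) := by
  cases a <;> cases b <;> simp [idxToInt, omin] <;> omega

-- A's fold, generalized over the running state
theorem foldA_char (l : List Char) : ∀ (n : Int) (b : Bool),
    (l.foldl stepA (n, b)).1
    = if b then n + l.length
      else match List.findIdx? (fun ch => ch == ',' || ch == '.') l with
           | none => n
           | some j => n + l.length - j - 1 := by
  induction l with
  | nil => intro n b; cases b <;> simp
  | cons h t ih =>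
    intro n b
    rw [List.foldl_cons]
    by_cases hs : (h == ',' || h == '.') = true
    · cases b with
      | true =>
        have hstep : stepA (n, true) h = (n + 1, true) := by simp [stepA, hs]
        rw [hstep, ih (n + 1) true]; simp; omega
      | false =>
        have hstep : stepA (n, false) h = (n, true) := by simp [stepA, hs]
        rw [hstep, ih n true]
        simp only [List.findIdx?_cons, hs, if_true, Bool.false_eq_true, if_false,
          List.length_cons]
        push_cast; ring
    · have hs' : (h == ',' || h == '.') = false := by simpa using hs
      cases b with
      | true =>
        have hstep : stepA (n, true) h = (n + 1, true) := by simp [stepA, hs']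
        rw [hstep, ih (n + 1) true]; simp; omega
      | false =>
        have hstep : stepA (n, false) h = (n, false) := by simp [stepA, hs']
        rw [hstep, ih n false]
        simp only [List.findIdx?_cons, hs', if_false, Bool.false_eq_true]
        cases List.findIdx? (fun ch => ch == ',' || ch == '.') t with
        | none => simp
        | some j => simp; omega

-- ===== VERDICT (by name: the statement is the Claim_ definition above) =====
theorem vratPocetDesetinychMist_spec : Claim_equal_vratPocetDesetinychMist := by
  intro text _
  unfold Spec_vratPocetDesetinychMist vratPocetDesetinychMist vratPocetDesetinychMist_alt
  have hc : (",".toList) = [','] := rfl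
  have hd : (".".toList) = ['.'] := rfl
  simp only [PySem.Str.find_eq, PySem.Str.len_eq, hc, hd, find_single,
    foldA_char text.toList 0 false, comb_eq_omin, ← findIdx_or,
    Bool.false_eq_true, if_false]
  cases he : List.findIdx? (fun ch => ch == ',' || ch == '.') text.toList with
  | none => simp [idxToInt]
  | some j =>
    have hj : j < text.toList.length := (List.findIdx?_eq_some_iff_findIdx_eq.mp he).1
    simp only [idxToInt]
    have hne : ((j : Int)) ≠ -1 := by omega
    simp only [hne, if_false]
    omega
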